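-- pv_equiv track=rewrite | github.com/ammesonb/ubiquiti-config-generator | ubiquiti_config_generator/type_checker.py | is_state
-- ===== SOURCE A (Python) =====
-- ENABLE = "enable"
--
-- DISABLE = "disable"
--
-- NEW = "new"
--
-- INVALID = "invalid"
--
-- ESTABLISHED = "established"
--
-- RELATED = "related"
--
-- def is_string_boolean(value: str) -> bool:
--     """
--     Checks if a given value is either enabled or disabled
--     """
--     return value in [ENABLE, DISABLE]
--
-- def is_state(value: dict) -> bool:
--     """
--     Is the value a set of connection states
--     """
--     keys = list(value.keys()) if isinstance(value, dict) else []
--     return (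
--         isinstance(value, dict)
--         and not any([key not in [NEW, ESTABLISHED, RELATED, INVALID] for key in keys])
--         and all(
--             [
--                 is_string_boolean(value.get(key, ENABLE))
--                 for key in [NEW, ESTABLISHED, RELATED, INVALID]
--             ]
--         )
--     )
-- ===== SOURCE B (Python) =====
-- ENABLE = "enable"
-- DISABLE = "disable"
-- NEW = "new"
-- INVALID = "invalid"
-- ESTABLISHED = "established"
-- RELATED = "related"
--
-- # Whitelist table: every valid (state, setting) pair, built once.
-- _ALLOWED_PAIRS = {
--     (key, val)
--     for key in (NEW, ESTABLISHED, RELATED, INVALID)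
--     for val in (ENABLE, DISABLE)
-- }
--
--
-- def is_state(value: dict) -> bool:
--     """Is the value a set of connection states (subset test against the
--     precomputed table of the 8 valid (key, value) pairs)."""
--     return isinstance(value, dict) and set(value.items()) <= _ALLOWED_PAIRS
-- ===== Notes on version B (the rewrite author's own statement) =====
-- stated objective: alternative
-- what changed: Replaces A's two scans (an any() over the actual keys plus an all() over the four fixed state names via get-with-default) by one precomputed whitelist table of the 8 valid (key, value) pairs and a single set-subset test of the dict's items against it.
import Mathlib
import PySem

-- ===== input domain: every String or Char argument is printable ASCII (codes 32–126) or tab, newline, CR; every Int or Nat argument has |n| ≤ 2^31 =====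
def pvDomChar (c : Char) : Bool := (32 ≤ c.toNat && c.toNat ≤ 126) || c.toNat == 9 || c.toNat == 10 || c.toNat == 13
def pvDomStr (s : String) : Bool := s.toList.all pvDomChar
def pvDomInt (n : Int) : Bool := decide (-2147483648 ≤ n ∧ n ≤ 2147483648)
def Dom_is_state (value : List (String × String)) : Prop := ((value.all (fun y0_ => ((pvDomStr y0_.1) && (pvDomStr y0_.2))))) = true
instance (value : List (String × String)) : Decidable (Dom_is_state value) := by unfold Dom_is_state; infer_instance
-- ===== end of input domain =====

-- B replaces A's two scans (any() over the keys, all() over the four fixed state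
-- names via get-with-default) by a precomputed whitelist table of the 8 valid
-- (key, value) pairs and one set-subset test of the dict's items against it.
-- The dict argument is marshalled as an assoc list; both ports rebuild the dict
-- with PySem.Dict.ofList (Python dict construction: duplicate keys overwrite).

-- ===== PORT A =====
def is_string_boolean (value : String) : Bool :=
  ["enable", "disable"].contains value

def is_state (value : List (String × String)) : Bool :=
  let d := PySem.Dict.ofList value
  let keys := d.keys
  (!(keys.any (fun key => !(["new", "established", "related", "invalid"].contains key))))
    &&
  (["new", "established", "related", "invalid"].all
    (fun key => is_string_boolean (d.getD key "enable")))

-- ===== PORT B =====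
-- the set comprehension {(key, val) for key in … for val in …}: a set built from
-- the cross product in comprehension order
def allowedPairs : PySem.Set (String × String) :=
  PySem.Set.ofList
    ((["new", "established", "related", "invalid"].flatMap
        (fun key => ["enable", "disable"].map (fun val => (key, val)))))

def is_state_alt (value : List (String × String)) : Bool :=
  let d := PySem.Dict.ofList value
  PySem.Set.issubset (PySem.Set.ofList d.items) allowedPairs

-- ===== PRECONDITION & SPEC =====
def Spec_is_state (value : List (String × String)) (out : Bool) : Prop := out = is_state_alt value
instance (value : List (String × String)) (out : Bool) : Decidable (Spec_is_state value out) := by unfold Spec_is_state; infer_instance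

-- ===== CLAIM (what is proved, stated in full; the proofs are below) =====
def Claim_equal_is_state : Prop := ∀ (value : List (String × String)), Dom_is_state value → Spec_is_state value (is_state value)

-- ===== LEMMAS AND PROOFS =====

theorem mem_allowedPairs (p : String × String) :
    p ∈ allowedPairs ↔
      (p.1 ∈ (["new", "established", "related", "invalid"] : List String)
        ∧ p.2 ∈ (["enable", "disable"] : List String)) := by
  obtain ⟨k, v⟩ := p
  simp only [allowedPairs, PySem.Set.mem_ofList, List.mem_flatMap, List.mem_map,
    Prod.mk.injEq]
  constructor
  · rintro ⟨k', hk', v', hv', rfl, rfl⟩; exact ⟨hk', hv'⟩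
  · rintro ⟨hk, hv⟩; exact ⟨k, hk, v, hv, rfl, rfl⟩

-- Core equivalence on any dict whose keys are nodup (true of every ofList dict).
theorem is_state_dict_eq (d : PySem.Dict String String) (hnd : d.keys.Nodup) :
    ((!(d.keys.any (fun key => !(["new", "established", "related", "invalid"].contains key))))
      && (["new", "established", "related", "invalid"].all
            (fun key => is_string_boolean (d.getD key "enable"))))
    = PySem.Set.issubset (PySem.Set.ofList d.items) allowedPairs := by
  rw [Bool.eq_iff_iff, PySem.Set.issubset_iff]
  simp only [Bool.and_eq_true, Bool.not_eq_true', List.any_eq_false,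
    List.all_eq_true, Bool.not_eq_false, List.contains_eq_mem, is_string_boolean,
    decide_eq_true_eq, PySem.Set.mem_ofList]
  constructor
  · rintro ⟨hk, hv⟩ ⟨k, v⟩ hm
    have hkk : k ∈ d.keys := PySem.Dict.mem_keys_of_mem_items d hm
    have hks := hk _ hkk
    rw [mem_allowedPairs]
    refine ⟨hks, ?_⟩
    have := hv _ hks
    rwa [PySem.Dict.getD_of_mem_items d hm hnd] at this
  · intro h
    constructor
    · intro k hk
      have h' : d.get? k ≠ none := fun hn =>
        (PySem.Dict.get?_eq_none_iff_not_mem_keys d k).mp hn hk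
      rcases Option.ne_none_iff_exists'.mp h' with ⟨v, hv⟩
      exact ((mem_allowedPairs (k, v)).mp
        (h (k, v) (PySem.Dict.mem_items_of_get?_eq_some d hv))).1
    · intro k hk
      cases hc : d.get? k with
      | none => simp [PySem.Dict.getD_eq_get?_getD, hc]
      | some v =>
        rw [PySem.Dict.getD_eq_get?_getD, hc, Option.getD_some]
        exact ((mem_allowedPairs (k, v)).mp
          (h (k, v) (PySem.Dict.mem_items_of_get?_eq_some d hc))).2

-- ===== VERDICT (by name: the statement is the Claim_ definition above) =====
theorem is_state_spec : Claim_equal_is_state := by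
  intro value _
  unfold Spec_is_state is_state is_state_alt
  exact is_state_dict_eq _ (PySem.Dict.nodup_keys_ofList value)
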